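-- pv_equiv track=rewrite | github.com/csutils/csmock | py/common/util.py | shell_quote
-- ===== SOURCE A (Python) =====
-- def shell_quote(str_in):
--     str_out = ""
--     for i in range(0, len(str_in)):
--         c = str_in[i]
--         if c == "\\":
--             str_out += "\\\\"
--         elif c == "\"":
--             str_out += "\\\""
--         elif c == "$":
--             str_out += "\\$"
--         else:
--             str_out += c
--     return "\"" + str_out + "\""
-- ===== SOURCE B (Python) =====
-- def shell_quote(str_in):
--     s = str_in.replace("\\", "\\\\").replace("\"", "\\\"").replace("$", "\\$")
--     return "\"" + s + "\""
-- ===== Notes on version B (the rewrite author's own statement) =====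
-- stated objective: idiomatic
-- what changed: Replaces the manual index loop with per-character if/elif branches by three sequential whole-string str.replace passes (backslash first so inserted escapes are never re-processed).
import Mathlib
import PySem

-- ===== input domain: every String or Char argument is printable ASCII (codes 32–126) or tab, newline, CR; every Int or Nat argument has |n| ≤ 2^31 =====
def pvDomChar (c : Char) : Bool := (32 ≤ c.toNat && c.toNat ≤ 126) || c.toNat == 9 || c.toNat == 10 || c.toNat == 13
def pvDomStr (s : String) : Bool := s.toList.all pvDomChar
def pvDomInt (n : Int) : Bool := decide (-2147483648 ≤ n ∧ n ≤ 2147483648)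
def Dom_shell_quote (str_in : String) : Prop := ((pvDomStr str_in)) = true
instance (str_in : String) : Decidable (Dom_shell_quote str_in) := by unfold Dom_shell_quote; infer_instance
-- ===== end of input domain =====

-- B replaces A's manual index loop with per-char if/elif branches by three chained str.replace passes (idiomatic).

-- ===== PORT A =====
-- for i in range(0, len(str_in)): c = str_in[i]; if/elif chain appending to str_out; return '"' + str_out + '"'
-- (the string accumulator is carried as List Char; '"' + … + '"' is the final cons/append)
def shell_quote (str_in : String) : String :=
  let str_out : List Char :=
    (PySem.List.pyRange 0 (PySem.Str.len str_in) 1).foldl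
      (fun acc i =>
        -- c = str_in[i], inlined
        if PySem.List.pyGetD str_in.toList i ' ' = '\\' then acc ++ ['\\', '\\']
        else if PySem.List.pyGetD str_in.toList i ' ' = '"' then acc ++ ['\\', '"']
        else if PySem.List.pyGetD str_in.toList i ' ' = '$' then acc ++ ['\\', '$']
        else acc ++ [PySem.List.pyGetD str_in.toList i ' ']) []
  String.ofList ('"' :: str_out ++ ['"'])

-- ===== PORT B =====
-- s = str_in.replace('\\','\\\\').replace('"','\\"').replace('$','\\$'); return '"' + s + '"'
def shell_quote_alt (str_in : String) : String :=
  let s := PySem.Str.replace (PySem.Str.replace (PySem.Str.replace str_in "\\" "\\\\") "\"" "\\\"") "$" "\\$"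
  String.ofList ('"' :: s.toList ++ ['"'])

-- ===== PRECONDITION & SPEC =====
def Spec_shell_quote (str_in : String) (out : String) : Prop := out = shell_quote_alt str_in
instance (str_in : String) (out : String) : Decidable (Spec_shell_quote str_in out) := by unfold Spec_shell_quote; infer_instance

-- ===== CLAIM (what is proved, stated in full; the proofs are below) =====
def Claim_equal_shell_quote : Prop := ∀ (str_in : String), Dom_shell_quote str_in → Spec_shell_quote str_in (shell_quote str_in)

-- ===== LEMMAS AND PROOFS =====

-- Chars.replace with a single-character pattern is a flatMap over the string.
theorem replace_single_go (o : Char) (new : List Char) :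
    ∀ (l : List Char) (fuel : Nat) (acc : List Char), l.length ≤ fuel →
      PySem.Chars.replace.go [o] new fuel l acc
        = acc.reverse ++ l.flatMap (fun c => if c = o then new else [c]) := by
  intro l
  induction l with
  | nil =>
    intro fuel acc _
    cases fuel <;> simp [PySem.Chars.replace.go]
  | cons c t ih =>
    intro fuel acc hle
    cases fuel with
    | zero => simp at hle
    | succ f =>
      simp only [PySem.Chars.replace.go]
      by_cases h : c = o
      · subst h
        have hpre : List.isPrefixOf [c] (c :: t) = true := by simp [List.isPrefixOf]
        rw [if_pos hpre]
        have hdrop : List.drop [c].length (c :: t) = t := rfl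
        rw [hdrop, ih f (new.reverse ++ acc) (Nat.le_of_succ_le_succ hle)]
        simp
      · have hpre : List.isPrefixOf [o] (c :: t) = false := by
          simp [List.isPrefixOf]
          exact fun hh => absurd hh.symm h
        rw [if_neg (by simp [hpre])]
        rw [ih f (c :: acc) (Nat.le_of_succ_le_succ hle)]
        simp [h]

theorem replace_single (s : List Char) (o : Char) (new : List Char) :
    PySem.Chars.replace s [o] new = s.flatMap (fun c => if c = o then new else [c]) := by
  rw [PySem.Chars.replace]
  simp only [List.isEmpty_cons]
  simpa using replace_single_go o new s s.length [] (le_refl _)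

-- A's loop over range(0, len) indexing the string is a flatMap of the per-char escape.
theorem shell_quote_loop_eq (s : String) :
    (PySem.List.pyRange 0 (PySem.Str.len s) 1).foldl
      (fun acc i =>
        if PySem.List.pyGetD s.toList i ' ' = '\\' then acc ++ ['\\', '\\']
        else if PySem.List.pyGetD s.toList i ' ' = '"' then acc ++ ['\\', '"']
        else if PySem.List.pyGetD s.toList i ' ' = '$' then acc ++ ['\\', '$']
        else acc ++ [PySem.List.pyGetD s.toList i ' ']) []
    = s.toList.flatMap (fun c =>
        if c = '\\' then ['\\', '\\']
        else if c = '"' then ['\\', '"']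
        else if c = '$' then ['\\', '$']
        else [c]) := by
  rw [show PySem.Str.len s = (s.toList.length : Int) by simp [PySem.Str.len_eq]]
  rw [PySem.List.foldl_pyRange_zero_pyGetD' s.toList ' '
      (fun acc c =>
        if c = '\\' then acc ++ ['\\', '\\']
        else if c = '"' then acc ++ ['\\', '"']
        else if c = '$' then acc ++ ['\\', '$']
        else acc ++ [c]) []]
  induction s.toList using List.reverseRecOn with
  | nil => simp
  | append_singleton xs x ih =>
    simp only [List.foldl_append, List.foldl_cons, List.foldl_nil, ih, List.flatMap_append]
    by_cases h1 : x = '\\' <;> by_cases h2 : x = '"' <;> by_cases h3 : x = '$' <;>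
      simp_all

-- B's three chained single-char replaces compose to the same flatMap.
theorem replace_chain_eq (s : String) :
    (PySem.Str.replace (PySem.Str.replace (PySem.Str.replace s "\\" "\\\\") "\"" "\\\"") "$" "\\$").toList
    = s.toList.flatMap (fun c =>
        if c = '\\' then ['\\', '\\']
        else if c = '"' then ['\\', '"']
        else if c = '$' then ['\\', '$']
        else [c]) := by
  simp only [PySem.Str.toList_replace]
  rw [show ("\\" : String).toList = ['\\'] from rfl, show ("\\\\" : String).toList = ['\\','\\'] from rfl,
      show ("\"" : String).toList = ['"'] from rfl, show ("\\\"" : String).toList = ['\\','"'] from rfl,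
      show ("$" : String).toList = ['$'] from rfl, show ("\\$" : String).toList = ['\\','$'] from rfl]
  rw [replace_single, replace_single, replace_single, List.flatMap_assoc, List.flatMap_assoc]
  apply List.flatMap_congr
  intro c _
  by_cases h1 : c = '\\' <;> by_cases h2 : c = '"' <;> by_cases h3 : c = '$' <;>
    simp_all

-- ===== VERDICT (by name: the statement is the Claim_ definition above) =====
theorem shell_quote_spec : Claim_equal_shell_quote := by
  intro s _
  show shell_quote s = shell_quote_alt s
  simp only [shell_quote, shell_quote_alt]
  rw [shell_quote_loop_eq, replace_chain_eq]
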